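-- pv_equiv track=rewrite | github.com/paul17crib/envoy-cli | envoy/reorder.py | move_key
-- ===== SOURCE A (Python) =====
-- from typing import Dict, List, Optional
--
-- class ReorderError(Exception):
--     """Raised when reordering cannot be completed."""
--
-- def move_key(
--     env: Dict[str, str],
--     key: str,
--     position: int,
-- ) -> Dict[str, str]:
--     """Move *key* to a specific *position* (0-based) in the mapping.
--
--     Raises :class:`ReorderError` if *key* is not present in *env*.
--     """
--     if key not in env:
--         raise ReorderError(f"Key '{key}' not found in env.")
--
--     keys = [k for k in env if k != key]
--     position = max(0, min(position, len(keys)))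
--     keys.insert(position, key)
--     return {k: env[k] for k in keys}
-- ===== SOURCE B (Python) =====
-- class ReorderError(Exception):
--     """Raised when reordering cannot be completed."""
--
-- def move_key(env, key, position):
--     if key not in env:
--         raise ReorderError(f"Key '{key}' not found in env.")
--     n = len(env) - 1                      # number of keys other than the target
--     pos = max(0, min(position, n))
--     out = {}
--     emitted = 0                           # non-target keys written so far
--     placed = False
--     for k, v in env.items():
--         if k == key:
--             continue
--         if not placed and emitted == pos:
--             out[key] = env[key]
--             placed = True
--         out[k] = v
--         emitted += 1
--     if not placed:
--         out[key] = env[key]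
--     return out
-- ===== Notes on version B (the rewrite author's own statement) =====
-- stated objective: alternative
-- what changed: A builds a key list, list.insert()s the target into it and rebuilds the dict with one env lookup per key; B makes a single streaming pass over env.items() with a counter of emitted non-target keys, splicing the target pair in flight when the counter reaches the clamped position (appending it after the loop when the position equals the number of other keys), so no key list, no list insert and no per-key lookup pass exist.
import Mathlib
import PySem

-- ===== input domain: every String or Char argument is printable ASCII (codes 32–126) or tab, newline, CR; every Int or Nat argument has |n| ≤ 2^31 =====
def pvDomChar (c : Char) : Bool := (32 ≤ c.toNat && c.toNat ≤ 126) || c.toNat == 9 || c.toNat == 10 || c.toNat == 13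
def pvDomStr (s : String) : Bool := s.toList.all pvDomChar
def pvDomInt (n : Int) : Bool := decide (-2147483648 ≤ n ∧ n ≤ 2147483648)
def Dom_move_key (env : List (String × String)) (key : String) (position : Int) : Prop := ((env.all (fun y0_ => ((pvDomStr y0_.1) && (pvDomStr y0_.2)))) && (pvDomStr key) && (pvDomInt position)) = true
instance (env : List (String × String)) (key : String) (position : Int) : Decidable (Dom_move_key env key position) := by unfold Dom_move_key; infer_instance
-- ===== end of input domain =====

-- B replaces A's key-list + list.insert + per-key dict-comprehension rebuild by ONE streaming pass
-- over the items with a counter, splicing the moved pair in flight (objective: alternative).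

-- ===== PORT A =====
def move_key (env : List (String × String)) (key : String) (position : Int) : List (String × String) :=
  if (env.map Prod.fst).contains key then
    let keys := (env.map Prod.fst).filter (fun k => k ≠ key)
    let position := max 0 (min position (keys.length : Int))
    let keys2 := PySem.List.insert keys position key
    -- {k: env[k] for k in keys}; under Pre_ every k is a key of env, so env[k] never raises
    -- and the .getD "" default is never taken
    (keys2.foldl (fun d k => d.insert k (((PySem.Dict.mk env).get? k).getD "")) PySem.Dict.empty).items
  else []  -- raise ReorderError: excluded by Pre_move_key

-- ===== PORT B =====
-- the body of B's single for-loop: state = (out, emitted, placed)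
def bstep (env : List (String × String)) (key : String) (pos : Int)
    (s : PySem.Dict String String × Int × Bool) (p : String × String) :
    PySem.Dict String String × Int × Bool :=
  if p.1 == key then s  -- continue
  else
    let s := if !s.2.2 && s.2.1 == pos
             then (s.1.insert key (((PySem.Dict.mk env).get? key).getD ""), s.2.1, true)
             else s
    (s.1.insert p.1 p.2, s.2.1 + 1, s.2.2)

def move_key_alt (env : List (String × String)) (key : String) (position : Int) : List (String × String) :=
  if (env.map Prod.fst).contains key then
    let n : Int := (env.length : Int) - 1
    let pos : Int := max 0 (min position n)
    let st := env.foldl (bstep env key pos) (PySem.Dict.empty, 0, false)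
    (if st.2.2 then st.1
     else st.1.insert key (((PySem.Dict.mk env).get? key).getD "")).items
  else []  -- raise ReorderError: excluded by Pre_move_key

-- ===== PRECONDITION & SPEC =====
-- Pre_ excludes (a) inputs where the key is absent: A raises ReorderError there; (b) association
-- lists with duplicate keys, which do not represent any Python dict (A's parameter is a dict, so
-- no Python call ever sees such an input).
def Pre_move_key (env : List (String × String)) (key : String) (position : Int) : Prop :=
  key ∈ env.map Prod.fst ∧ (env.map Prod.fst).Nodup
instance (env : List (String × String)) (key : String) (position : Int) : Decidable (Pre_move_key env key position) := by unfold Pre_move_key; infer_instance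

def pvWitness_move_key : (List (String × String)) × String × Int := ([("a", "1"), ("b", "2"), ("c", "3")], "b", 2)

def Spec_move_key (env : List (String × String)) (key : String) (position : Int) (out : List (String × String)) : Prop := out = move_key_alt env key position
instance (env : List (String × String)) (key : String) (position : Int) (out : List (String × String)) : Decidable (Spec_move_key env key position out) := by unfold Spec_move_key; infer_instance

-- ===== CLAIM (what is proved, stated in full; the proofs are below) =====
def Claim_equal_move_key : Prop := ∀ (env : List (String × String)) (key : String) (position : Int), Dom_move_key env key position → Pre_move_key env key position → Spec_move_key env key position (move_key env key position)

-- ===== LEMMAS AND PROOFS =====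

-- the value lookup both programs perform, written out
theorem lookup_of_mem {env : List (String × String)} {p : String × String}
    (hmem : p ∈ env) (hnd : (env.map Prod.fst).Nodup) :
    (((PySem.Dict.mk env).get? p.1).getD "") = p.2 := by
  have h : (PySem.Dict.mk env).get? p.1 = some p.2 :=
    PySem.Dict.get?_of_mem_items (PySem.Dict.mk env) (by exact hmem) (by simpa [PySem.Dict.keys] using hnd)
  simp [h]

-- a nodup association list has exactly one pair carrying a present key
theorem length_filter_ne (env : List (String × String)) (key : String)
    (hin : key ∈ env.map Prod.fst) (hnd : (env.map Prod.fst).Nodup) :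
    (env.filter (fun p => p.1 ≠ key)).length + 1 = env.length := by
  induction env with
  | nil => simp at hin
  | cons p t ih =>
    simp only [List.map_cons, List.nodup_cons] at hnd
    by_cases hpk : p.1 = key
    · have ht : t.filter (fun q => q.1 ≠ key) = t := by
        apply List.filter_eq_self.mpr
        intro q hq
        simp only [decide_eq_true_eq]
        intro hqk
        apply hnd.1
        rw [hpk, ← hqk]
        exact List.mem_map_of_mem hq
      have hfc : (p :: t).filter (fun q => q.1 ≠ key) = t.filter (fun q => q.1 ≠ key) := by
        simp [List.filter_cons, hpk]
      rw [hfc, ht]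
      simp
    · have hin' : key ∈ t.map Prod.fst := by
        rw [List.map_cons] at hin
        rcases List.mem_cons.mp hin with h | h
        · exact absurd h.symm hpk
        · exact h
      have := ih hin' hnd.2
      have hfc : (p :: t).filter (fun q => q.1 ≠ key) = p :: t.filter (fun q => q.1 ≠ key) := by
        simp [List.filter_cons, hpk]
      rw [hfc]
      simp only [List.length_cons]
      omega

-- once placed, B's loop only copies the remaining non-target pairs and counts them
theorem btrue (env : List (String × String)) (key : String) (pos : Int) :
    ∀ (l : List (String × String)) (d : PySem.Dict String String) (e : Int),
    l.foldl (bstep env key pos) (d, e, true) =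
      ((l.filter (fun p => p.1 ≠ key)).foldl (fun d p => d.insert p.1 p.2) d,
       e + (((l.filter (fun p => p.1 ≠ key)).length : Int)), true) := by
  intro l
  induction l with
  | nil => intro d e; simp
  | cons p t ih =>
    intro d e
    by_cases hpk : p.1 = key
    · have hstep : (p :: t).foldl (bstep env key pos) (d, e, true)
          = t.foldl (bstep env key pos) (d, e, true) := by
        simp [bstep, hpk]
      have hfc : (p :: t).filter (fun q => q.1 ≠ key) = t.filter (fun q => q.1 ≠ key) := by
        simp [hpk]
      rw [hstep, hfc, ih]
    · have hstep : (p :: t).foldl (bstep env key pos) (d, e, true)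
          = t.foldl (bstep env key pos) (d.insert p.1 p.2, e + 1, true) := by
        simp [bstep, hpk]
      have hfc : (p :: t).filter (fun q => q.1 ≠ key) = p :: t.filter (fun q => q.1 ≠ key) := by
        simp [hpk]
      rw [hstep, hfc, ih]
      simp only [List.foldl_cons, List.length_cons, Prod.mk.injEq]
      refine ⟨trivial, ?_, trivial⟩
      push_cast; ring

-- main invariant of B's loop while the target is not yet placed
theorem bmain (env : List (String × String)) (key : String) (pos : Int) :
    ∀ (l : List (String × String)) (d : PySem.Dict String String) (e : Int),
    d.contains key = false →
    (∀ p ∈ l, p.1 ≠ key → d.contains p.1 = false) →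
    ((l.filter (fun p => p.1 ≠ key)).map Prod.fst).Nodup →
    e ≤ pos →
    (l.foldl (bstep env key pos) (d, e, false)).2.1
        = e + (((l.filter (fun p => p.1 ≠ key)).length : Int)) ∧
    (l.foldl (bstep env key pos) (d, e, false)).2.2
        = decide (pos < e + (((l.filter (fun p => p.1 ≠ key)).length : Int))) ∧
    (l.foldl (bstep env key pos) (d, e, false)).1.items
        = (if pos < e + (((l.filter (fun p => p.1 ≠ key)).length : Int))
           then d.items ++ (l.filter (fun p => p.1 ≠ key)).take (pos - e).toNat
                ++ ((key, ((PySem.Dict.mk env).get? key).getD "")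
                     :: (l.filter (fun p => p.1 ≠ key)).drop (pos - e).toNat)
           else d.items ++ l.filter (fun p => p.1 ≠ key)) := by
  intro l
  induction l with
  | nil =>
    intro d e _ _ _ he
    simp only [List.foldl_nil, List.filter_nil, List.length_nil, Nat.cast_zero, add_zero]
    refine ⟨trivial, by simp [not_lt.mpr he], by simp [not_lt.mpr he]⟩
  | cons p t ih =>
    intro d e hk hfresh hnd he
    by_cases hpk : p.1 = key
    · -- skipped pair
      have hf : (p :: t).filter (fun q => q.1 ≠ key) = t.filter (fun q => q.1 ≠ key) := by
        simp [List.filter_cons, hpk]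
      simp only [List.foldl_cons, bstep, beq_iff_eq, hpk, if_pos rfl, hf]
      exact ih d e hk (fun q hq => hfresh q (List.mem_cons_of_mem _ hq)) (hf ▸ hnd) he
    · -- emitted pair
      have hf : (p :: t).filter (fun q => q.1 ≠ key) = p :: t.filter (fun q => q.1 ≠ key) := by
        simp [List.filter_cons, hpk]
      rw [hf] at hnd ⊢
      simp only [List.map_cons, List.nodup_cons] at hnd
      have hdp : d.contains p.1 = false := hfresh p (List.mem_cons_self) hpk
      by_cases hep : e = pos
      · -- place the target now, then copy the rest
        have hstep : (p :: t).foldl (bstep env key pos) (d, e, false)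
            = t.foldl (bstep env key pos)
                (((d.insert key (((PySem.Dict.mk env).get? key).getD "")).insert p.1 p.2),
                 e + 1, true) := by
          simp [List.foldl_cons, bstep, hpk, hep]
        rw [hstep, btrue]
        set val := ((PySem.Dict.mk env).get? key).getD "" with hval
        set r := t.filter (fun q => q.1 ≠ key) with hr
        have hlt : pos < e + ((r.length : Int) + 1) := by omega
        have hd1 : (d.insert key val).items = d.items ++ [(key, val)] :=
          PySem.Dict.items_insert_of_not_contains _ _ hk
        have hd2c : (d.insert key val).contains p.1 = false := by
          rw [PySem.Dict.contains_insert]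
          simp [hpk, hdp]
        have hd2 : ((d.insert key val).insert p.1 p.2).items
            = d.items ++ [(key, val)] ++ [(p.1, p.2)] := by
          rw [PySem.Dict.items_insert_of_not_contains _ _ hd2c, hd1]
        have hfresh2 : ∀ q ∈ r, ((d.insert key val).insert p.1 p.2).contains q.1 = false := by
          intro q hq
          have hq' : q ∈ t ∧ q.1 ≠ key := by
            have := List.mem_filter.mp (hr ▸ hq)
            exact ⟨this.1, by simpa using this.2⟩
          rw [PySem.Dict.contains_insert, PySem.Dict.contains_insert]
          have hqp : q.1 ≠ p.1 := by
            intro hqp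
            exact hnd.1 (hqp ▸ List.mem_map_of_mem hq)
          simp [hqp, hq'.2, hfresh q (List.mem_cons_of_mem _ hq'.1) hq'.2]
        have hitems := PySem.Dict.items_foldl_insert_fresh
          (l := r) (k := Prod.fst) (v := Prod.snd)
          (d := (d.insert key val).insert p.1 p.2) hfresh2 hnd.2
        refine ⟨by simp only [List.length_cons]; push_cast; omega,
          by simp only [List.length_cons]; symm; rw [decide_eq_true_eq]; push_cast; omega, ?_⟩
        rw [if_pos (by simp only [List.length_cons]; push_cast; omega)]
        have hz : (pos - e).toNat = 0 := by omega
        simp only [hz, List.take_zero, List.drop_zero, List.append_nil]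
        calc (r.foldl (fun d p => d.insert p.1 p.2) ((d.insert key val).insert p.1 p.2)).items
            = ((d.insert key val).insert p.1 p.2).items ++ r.map (fun q => (q.1, q.2)) := hitems
          _ = d.items ++ ((key, val) :: p :: r) := by simp [hd2]
      · -- not yet at the position: keep counting
        have helt : e < pos := lt_of_le_of_ne he hep
        have hstep : (p :: t).foldl (bstep env key pos) (d, e, false)
            = t.foldl (bstep env key pos) (d.insert p.1 p.2, e + 1, false) := by
          simp [List.foldl_cons, bstep, hpk, hep]
        have hk' : (d.insert p.1 p.2).contains key = false := by
          rw [PySem.Dict.contains_insert]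
          have hkp : key ≠ p.1 := fun h => hpk h.symm
          simp [hkp, hk]
        have hfresh' : ∀ q ∈ t, q.1 ≠ key → (d.insert p.1 p.2).contains q.1 = false := by
          intro q hq hqk
          rw [PySem.Dict.contains_insert]
          have hqp : q.1 ≠ p.1 := by
            intro hqp
            exact hnd.1 (hqp ▸ List.mem_map_of_mem (List.mem_filter.mpr ⟨hq, by simpa using hqk⟩))
          simp [hqp, hfresh q (List.mem_cons_of_mem _ hq) hqk]
        obtain ⟨h1, h2, h3⟩ := ih (d.insert p.1 p.2) (e + 1) hk' hfresh' hnd.2 (by omega)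
        rw [hstep]
        set val := ((PySem.Dict.mk env).get? key).getD "" with hval
        set r := t.filter (fun q => q.1 ≠ key) with hr
        have hdi : (d.insert p.1 p.2).items = d.items ++ [(p.1, p.2)] :=
          PySem.Dict.items_insert_of_not_contains _ _ hdp
        simp only [List.length_cons, Nat.cast_add, Nat.cast_one]
        refine ⟨by rw [h1]; omega, ?_, ?_⟩
        · rw [h2]
          have hiff : (pos < e + 1 + (r.length : Int)) ↔ (pos < e + ((r.length : Int) + 1)) := by omega
          simp [hiff]
        · rw [h3, hdi]
          by_cases hcase : pos < e + 1 + (r.length : Int)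
          · rw [if_pos hcase, if_pos (by omega)]
            have htn : (pos - e).toNat = (pos - (e + 1)).toNat + 1 := by omega
            simp only [htn, List.take_succ_cons, List.drop_succ_cons]
            simp
          · rw [if_neg hcase, if_neg (by omega)]
            simp

-- ===== VERDICT support: both ports equal the spliced pair list =====
theorem move_key_eq (env : List (String × String)) (key : String) (position : Int)
    (hin : key ∈ env.map Prod.fst) (hnd : (env.map Prod.fst).Nodup) :
    move_key env key position = move_key_alt env key position := by
  have hc : (env.map Prod.fst).contains key = true := by simpa using hin
  unfold move_key move_key_alt
  rw [if_pos hc, if_pos hc]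
  simp only []
  set val := ((PySem.Dict.mk env).get? key).getD "" with hval
  set rest := env.filter (fun p => p.1 ≠ key) with hrest
  set keysA := (env.map Prod.fst).filter (fun k => k ≠ key) with hkA
  have hkeys : keysA = rest.map Prod.fst := by
    rw [hkA, hrest, List.filter_map]
    rfl
  have hlenA : (keysA.length : Int) = (rest.length : Int) := by
    rw [hkeys, List.length_map]
  have hlenB : (env.length : Int) - 1 = (rest.length : Int) := by
    have := length_filter_ne env key hin hnd
    rw [← hrest] at this
    omega
  rw [hlenA, hlenB]
  set M := max 0 (min position (rest.length : Int)) with hM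
  have h0 : 0 ≤ M := le_max_left _ _
  have hMle : M ≤ (rest.length : Int) := by
    have : min position (rest.length : Int) ≤ (rest.length : Int) := min_le_right _ _
    omega
  set n := M.toNat with hn
  have hMn : M = (n : Int) := (Int.toNat_of_nonneg h0).symm
  have hnle : n ≤ rest.length := by omega
  have hnleA : n ≤ keysA.length := by rw [hkeys, List.length_map]; exact hnle
  -- ===== A's side: the splice =====
  rw [hMn, PySem.List.insert_natCast keysA n key hnleA]
  have hndA : keysA.Nodup := hnd.filter _
  have hkeyA : key ∉ keysA := by simp [hkA, List.mem_filter]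
  have hnd2 : (keysA.take n ++ key :: keysA.drop n).Nodup := by
    have hperm : (keysA.take n ++ key :: keysA.drop n).Perm (key :: keysA) := by
      have := List.perm_middle (a := key) (l₁ := keysA.take n) (l₂ := keysA.drop n)
      simpa [List.take_append_drop] using this
    exact hperm.nodup_iff.mpr (List.nodup_cons.mpr ⟨hkeyA, hndA⟩)
  have hA := PySem.Dict.items_foldl_insert_fresh (l := keysA.take n ++ key :: keysA.drop n)
      (k := fun x => x) (v := fun k => (((PySem.Dict.mk env).get? k).getD ""))
      (d := PySem.Dict.empty) (by intro a _; simp [PySem.Dict.contains_empty])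
      (by simpa using hnd2)
  rw [hA]
  have hmemrest : ∀ p ∈ rest, (((PySem.Dict.mk env).get? p.1).getD "") = p.2 := by
    intro p hp
    exact lookup_of_mem (List.mem_of_mem_filter hp) hnd
  have htake : (keysA.take n).map (fun k => (k, ((PySem.Dict.mk env).get? k).getD "")) = rest.take n := by
    rw [hkeys, ← List.map_take, List.map_map]
    calc (rest.take n).map ((fun k => (k, ((PySem.Dict.mk env).get? k).getD "")) ∘ Prod.fst)
        = (rest.take n).map (fun p => p) := by
          apply List.map_congr_left
          intro p hp
          have := hmemrest p (List.mem_of_mem_take hp)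
          simp [Function.comp, this]
      _ = rest.take n := by simp
  have hdrop : (keysA.drop n).map (fun k => (k, ((PySem.Dict.mk env).get? k).getD "")) = rest.drop n := by
    rw [hkeys, ← List.map_drop, List.map_map]
    calc (rest.drop n).map ((fun k => (k, ((PySem.Dict.mk env).get? k).getD "")) ∘ Prod.fst)
        = (rest.drop n).map (fun p => p) := by
          apply List.map_congr_left
          intro p hp
          have := hmemrest p (List.mem_of_mem_drop hp)
          simp [Function.comp, this]
      _ = rest.drop n := by simp
  have hAside : (PySem.Dict.empty.items : List (String × String))
      ++ (keysA.take n ++ key :: keysA.drop n).map (fun k => (k, ((PySem.Dict.mk env).get? k).getD ""))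
      = rest.take n ++ (key, val) :: rest.drop n := by
    simp [htake, hdrop, PySem.Dict.empty, hval]
  rw [hAside]
  -- ===== B's side: the loop invariant =====
  have hndR : (rest.map Prod.fst).Nodup := by rw [← hkeys]; exact hndA
  obtain ⟨h1, h2, h3⟩ := bmain env key ((n : Nat) : Int) env PySem.Dict.empty 0
    (by simp [PySem.Dict.contains_empty]) (by intro q _ _; simp [PySem.Dict.contains_empty])
    (by rw [← hrest]; exact hndR) (by positivity)
  rw [← hrest] at h1 h2 h3
  by_cases hlt : ((n : Nat) : Int) < (rest.length : Int)
  · have h2' : (env.foldl (bstep env key ((n : Nat) : Int)) (PySem.Dict.empty, 0, false)).2.2 = true := by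
      rw [h2]; simp; omega
    rw [h2', if_pos rfl, h3, if_pos (by omega)]
    simp [PySem.Dict.empty, hval]
  · have hneq' : ((n : Nat) : Int) = (rest.length : Int) := by omega
    have h2' : (env.foldl (bstep env key ((n : Nat) : Int)) (PySem.Dict.empty, 0, false)).2.2 = false := by
      rw [h2]; simp; omega
    rw [h2', if_neg (by simp)]
    have h3' : (env.foldl (bstep env key ((n : Nat) : Int)) (PySem.Dict.empty, 0, false)).1.items = rest := by
      rw [h3, if_neg (by omega)]
      simp [PySem.Dict.empty]
    have hcon : (env.foldl (bstep env key ((n : Nat) : Int)) (PySem.Dict.empty, 0, false)).1.contains key = false := by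
      rw [PySem.Dict.contains_eq_decide_mem_keys]
      simp only [PySem.Dict.keys, h3']
      simp only [decide_eq_false_iff_not]
      intro hmem
      rcases List.mem_map.mp hmem with ⟨q, hq, hq1⟩
      have := (List.mem_filter.mp (hrest ▸ hq)).2
      simp [hq1] at this
    rw [PySem.Dict.items_insert_of_not_contains _ _ hcon, h3']
    have hneq : n = rest.length := by omega
    rw [hneq, List.take_of_length_le (le_refl _), List.drop_of_length_le (le_refl _)]

-- ===== VERDICT (by name: the statement is the Claim_ definition above) =====
theorem move_key_spec : Claim_equal_move_key := by
  intro env key position _ hpre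
  exact move_key_eq env key position hpre.1 hpre.2
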